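-- pv_equiv track=rewrite | github.com/nmpluta/Python | Exam/I1.py | i1d
-- ===== SOURCE A (Python) =====
-- def i1d(string):
--     result = []
--     max_ampl = 0
--     _ = 0
--     temp = '0' + string
--     for index in range(1, len(string) + 1, 1):
--         if temp[index] == '1' and temp[index - 1] == '0':               # rising edge
--             if _ > max_ampl:
--                 max_ampl = _
--                 max_index = index - 1
--             result.append('r')
--             _ = 0
--         else:
--             result.append('-')
--             _ += 1
--     result[max_index] = 'x'
--     return "".join(result)
-- ===== SOURCE B (Python) =====
-- def i1d(string):
--     n = len(string)
--     marks = ['-'] * n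
--     edges = [p for p in range(n)
--              if string[p] == '1' and (p == 0 or string[p - 1] == '0')]
--     for p in edges:
--         marks[p] = 'r'
--     prev = -1
--     best = 0
--     for p in edges:
--         if p - prev - 1 > best:
--             best = p - prev - 1
--             chosen = p
--         prev = p
--     marks[chosen] = 'x'
--     return "".join(marks)
-- ===== Notes on version B (the rewrite author's own statement) =====
-- stated objective: alternative
-- what changed: B replaces A's single stateful scan (flat-run counter and best edge tracked inline while appending markers) by three separate passes: build the list of rising-edge indices, write 'r' markers into a preallocated list by assignment, then a gap pass over the edge indices (gap = p - prev - 1) to pick the first strictly-best edge for 'x'.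
import Mathlib
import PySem

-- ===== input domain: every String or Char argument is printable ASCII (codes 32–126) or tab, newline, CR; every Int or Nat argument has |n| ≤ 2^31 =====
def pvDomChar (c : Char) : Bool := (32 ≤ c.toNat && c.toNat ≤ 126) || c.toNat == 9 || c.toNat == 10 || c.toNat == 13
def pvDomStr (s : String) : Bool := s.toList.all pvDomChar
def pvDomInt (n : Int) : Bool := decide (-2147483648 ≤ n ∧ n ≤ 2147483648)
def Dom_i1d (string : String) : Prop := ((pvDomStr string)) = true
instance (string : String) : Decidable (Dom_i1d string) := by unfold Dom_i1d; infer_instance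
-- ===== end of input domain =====

-- B replaces A's single stateful scan (run counter + best edge tracked inline) by an
-- edge-index list, a marker list written by assignment, and a separate gap pass over
-- the edges; objective: alternative decomposition, same linear cost.

-- ===== PORT A =====
-- A's loop body; state = (result, max_ampl, _, max_index).  Indexing is in range for
-- every index the loop produces, so the '?' default of pyGetD never fires.
def i1dStepA (temp : List Char) (st : List Char × Int × Int × Option Int) (index : Int) :
    List Char × Int × Int × Option Int :=
  if PySem.List.pyGetD temp index '?' = '1' ∧ PySem.List.pyGetD temp (index - 1) '?' = '0' then
    if st.2.2.1 > st.2.1 then (st.1 ++ ['r'], st.2.2.1, 0, some (index - 1))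
    else (st.1 ++ ['r'], st.2.1, 0, st.2.2.2)
  else (st.1 ++ ['-'], st.2.1, st.2.2.1 + 1, st.2.2.2)

-- result[max_index] = 'x'; "".join(result)
def i1dFinishA : List Char × Int × Int × Option Int → String
  | (result, _, _, some mi) => String.ofList (result.set mi.toNat 'x')
  | (result, _, _, none) => String.ofList result   -- Python raises UnboundLocalError here (outside Pre_)

def i1d (string : String) : String :=
  i1dFinishA ((PySem.List.pyRange 1 ((string.toList.length : Int) + 1) 1).foldl
    (i1dStepA ('0' :: string.toList)) ([], 0, 0, none))

-- ===== PORT B =====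
-- rising edge at position p of s
def i1dEdge (s : List Char) (p : Nat) : Bool :=
  s.getD p '?' = '1' && (p == 0 || s.getD (p - 1) '?' = '0')

-- one step of the gap pass; state = (prev, best, chosen)
def i1dSelStep (st : Int × Int × Option Nat) (p : Nat) : Int × Int × Option Nat :=
  if (p : Int) - st.1 - 1 > st.2.1 then ((p : Int), (p : Int) - st.1 - 1, some p)
  else ((p : Int), st.2.1, st.2.2)

-- marks[chosen] = 'x'; "".join(marks)
def i1dFinishB (marks : List Char) : Option Nat → String
  | some c => String.ofList (marks.set c 'x')
  | none => String.ofList marks   -- Python raises UnboundLocalError here (outside Pre_)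

def i1d_alt (string : String) : String :=
  i1dFinishB
    (((List.range string.toList.length).filter (i1dEdge string.toList)).foldl
      (fun m p => m.set p 'r') (List.replicate string.toList.length '-'))
    ((((List.range string.toList.length).filter (i1dEdge string.toList)).foldl
      i1dSelStep (-1, 0, none)).2.2)

-- ===== PRECONDITION & SPEC =====
-- Pre_ excludes exactly the inputs without a "01" rising edge away from position 0,
-- on which Python A raises UnboundLocalError (max_index never assigned); B raises too.
def Pre_i1d (string : String) : Prop := PySem.Str.isIn "01" string = true
instance (string : String) : Decidable (Pre_i1d string) := by unfold Pre_i1d; infer_instance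

def pvWitness_i1d : String := "01"

def Spec_i1d (string : String) (out : String) : Prop := out = i1d_alt string
instance (string : String) (out : String) : Decidable (Spec_i1d string out) := by unfold Spec_i1d; infer_instance

-- ===== CLAIM (what is proved, stated in full; the proofs are below) =====
def Claim_equal_i1d : Prop := ∀ (string : String), Dom_i1d string → Pre_i1d string → Spec_i1d string (i1d string)

-- ===== LEMMAS AND PROOFS =====

-- the marker list both programs build, in closed form
def i1dMarks (s : List Char) (k : Nat) : List Char :=
  (List.range k).map (fun p => if i1dEdge s p then 'r' else '-')

-- pointwise value of B's marker pass
lemma i1d_set_fold_getElem? (l : List Nat) (m : List Char) (q : Nat) :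
    (l.foldl (fun m p => m.set p 'r') m)[q]? =
      if q ∈ l ∧ q < m.length then some 'r' else m[q]? := by
  induction l generalizing m with
  | nil => simp
  | cons p l ih =>
      simp only [List.foldl_cons, ih, List.length_set, List.getElem?_set, List.mem_cons]
      by_cases h1 : q ∈ l <;> by_cases h2 : q < m.length <;> by_cases h3 : p = q <;>
        simp_all [List.getElem?_eq_none_iff, eq_comm]

-- B's marker pass equals the closed form
lemma i1d_marks_eq (s : List Char) :
    ((List.range s.length).filter (i1dEdge s)).foldl (fun m p => m.set p 'r')
        (List.replicate s.length '-') = i1dMarks s s.length := by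
  apply List.ext_getElem?
  intro q
  rw [i1d_set_fold_getElem?]
  simp only [i1dMarks, List.getElem?_map, List.length_replicate, List.mem_filter,
    List.mem_range, List.getElem?_replicate]
  by_cases hq : q < s.length
  · by_cases he : i1dEdge s q = true <;> simp [hq, he]
  · simp [hq]

-- A's loop state after the first k positions, in terms of B's edge fold
lemma i1d_loop_inv (s : List Char) (k : Nat) (hk : k ≤ s.length) :
    (PySem.List.pyRange 1 ((k : Int) + 1) 1).foldl (i1dStepA ('0' :: s)) ([], 0, 0, none) =
      (i1dMarks s k,
       (((List.range k).filter (i1dEdge s)).foldl i1dSelStep (-1, 0, none)).2.1,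
       (k : Int) - 1 - (((List.range k).filter (i1dEdge s)).foldl i1dSelStep (-1, 0, none)).1,
       (((List.range k).filter (i1dEdge s)).foldl i1dSelStep (-1, 0, none)).2.2.map
         (fun c => (c : Int))) := by
  induction k with
  | zero =>
      rw [PySem.List.pyRange_one_eq_nil (by omega)]
      simp [i1dMarks]
  | succ k ih =>
      have hk' : k ≤ s.length := Nat.le_of_succ_le hk
      have hrange : PySem.List.pyRange 1 (((k + 1 : Nat) : Int) + 1) 1 =
          PySem.List.pyRange 1 ((k : Int) + 1) 1 ++ [(k : Int) + 1] := by
        have := PySem.List.pyRange_one_succ_right (a := 1) (b := (k : Int) + 1) (by omega)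
        rw [← this]; norm_num
      have hcond : (PySem.List.pyGetD ('0' :: s) ((k : Int) + 1) '?' = '1' ∧
          PySem.List.pyGetD ('0' :: s) ((k : Int) + 1 - 1) '?' = '0') ↔ i1dEdge s k = true := by
        have e1 : ((k : Int) + 1) = ((k + 1 : Nat) : Int) := by push_cast; ring
        have e2 : ((k : Int) + 1 - 1) = ((k : Nat) : Int) := by ring_nf
        rw [e2, e1, PySem.List.pyGetD_natCast, PySem.List.pyGetD_natCast]
        unfold i1dEdge
        cases k with
        | zero => simp [List.getD]
        | succ k' => simp [List.getD]
      rw [hrange, List.foldl_append, List.foldl_cons, List.foldl_nil, ih hk']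
      rw [List.range_succ, List.filter_append, List.filter_cons, List.filter_nil]
      by_cases he : i1dEdge s k = true
      · simp only [he, if_true, List.foldl_append, List.foldl_cons, List.foldl_nil]
        generalize ((List.range k).filter (i1dEdge s)).foldl i1dSelStep (-1, 0, none) = st
        obtain ⟨prev, best, chosen⟩ := st
        unfold i1dStepA i1dSelStep
        rw [if_pos (hcond.mpr he)]
        by_cases hb : best < (k : Int) - prev - 1
        · rw [if_pos (show ((k : Int)) - 1 - prev > best by omega), if_pos hb]
          simp [i1dMarks, List.range_succ, he]
          omega
        · rw [if_neg (show ¬((k : Int)) - 1 - prev > best by omega), if_neg hb]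
          simp [i1dMarks, List.range_succ, he]
      · simp only [he, Bool.false_eq_true, if_false, List.append_nil]
        generalize ((List.range k).filter (i1dEdge s)).foldl i1dSelStep (-1, 0, none) = st
        obtain ⟨prev, best, chosen⟩ := st
        unfold i1dStepA
        rw [if_neg (fun h => he (hcond.mp h))]
        simp [i1dMarks, List.range_succ, he]
        omega

-- ===== VERDICT (by name: the statement is the Claim_ definition above) =====
theorem i1d_spec : Claim_equal_i1d := by
  intro string _ _
  unfold Spec_i1d i1d i1d_alt
  rw [i1d_loop_inv string.toList string.toList.length (le_refl _), i1d_marks_eq]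
  cases hc : (((List.range string.toList.length).filter (i1dEdge string.toList)).foldl
      i1dSelStep (-1, 0, none)).2.2 with
  | none => simp [i1dFinishA, i1dFinishB]
  | some c => simp [i1dFinishA, i1dFinishB]
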